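-- pv_equiv track=rewrite | github.com/ChinmayyK/BlockVault | blockvault/core/zk_redaction.py | _mask_bits_to_ranges
-- ===== SOURCE A (Python) =====
-- from typing import Any, Callable, Dict, List, Optional
--
-- def _mask_bits_to_ranges(mask_bits: List[int], block_size: int, max_len: int) -> List[Dict[str, int]]:
--     ranges: List[Dict[str, int]] = []
--     current_start = None
--     for idx, bit in enumerate(mask_bits):
--         if bit and current_start is None:
--             current_start = idx * block_size
--         if not bit and current_start is not None:
--             end = min(idx * block_size, max_len)
--             if current_start < end:
--                 ranges.append({"start": current_start, "end": end})
--             current_start = None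
--     if current_start is not None:
--         end = min(len(mask_bits) * block_size, max_len)
--         if current_start < end:
--             ranges.append({"start": current_start, "end": end})
--     return ranges
-- ===== SOURCE B (Python) =====
-- def _mask_bits_to_ranges(mask_bits, block_size, max_len):
--     """Run-scan re-implementation: find each maximal run of truthy bits [i, j)
--     with an index scan, then emit its byte range directly."""
--     ranges = []
--     n = len(mask_bits)
--     i = 0
--     while i < n:
--         if not mask_bits[i]:
--             i += 1
--             continue
--         j = i
--         while j < n and mask_bits[j]:
--             j += 1
--         start = i * block_size
--         end = min(j * block_size, max_len)
--         if start < end: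
--             ranges.append({"start": start, "end": end})
--         i = j
--     return ranges
-- ===== Notes on version B (the rewrite author's own statement) =====
-- stated objective: alternative
-- what changed: Replaces the single-pass boundary-tracking state machine (Optional current_start with a final flush) by a run-enumeration scan: an outer index loop finds each maximal run of truthy bits and emits its range directly, so there is no carried Optional state and no trailing flush.
import Mathlib
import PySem

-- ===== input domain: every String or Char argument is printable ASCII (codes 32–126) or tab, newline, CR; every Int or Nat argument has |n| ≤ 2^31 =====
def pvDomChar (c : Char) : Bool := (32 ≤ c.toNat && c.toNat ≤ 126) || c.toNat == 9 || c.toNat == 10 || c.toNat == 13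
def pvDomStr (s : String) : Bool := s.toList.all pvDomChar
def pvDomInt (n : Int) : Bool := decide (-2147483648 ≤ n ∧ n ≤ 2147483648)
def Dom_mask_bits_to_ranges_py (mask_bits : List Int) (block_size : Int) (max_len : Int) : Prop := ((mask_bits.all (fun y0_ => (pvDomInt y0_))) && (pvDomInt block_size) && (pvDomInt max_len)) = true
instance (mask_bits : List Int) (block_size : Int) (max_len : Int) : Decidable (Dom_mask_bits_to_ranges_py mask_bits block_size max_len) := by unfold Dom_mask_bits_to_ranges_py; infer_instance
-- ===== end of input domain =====

-- B replaces A's boundary-tracking state machine by a run-enumeration scan (objective: alternative decomposition, same cost).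

-- ===== PORT A =====
-- the for-loop of A: state = (ranges, current_start); bit truthiness = ≠ 0
def aLoop (block_size max_len : Int) : List Int → Int → Option Int → List (List (String × Int)) → List (List (String × Int)) × Option Int
  | [], _, cur, rs => (rs, cur)
  | bit :: rest, idx, cur, rs =>
    if bit ≠ 0 then
      -- 'if bit and current_start is None: current_start = idx*block_size'; the second if cannot fire
      aLoop block_size max_len rest (idx + 1) (if cur = none then some (idx * block_size) else cur) rs
    else
      -- 'if not bit and current_start is not None: …'
      match cur with
      | some s =>
        let e := min (idx * block_size) max_len
        aLoop block_size max_len rest (idx + 1) none (if s < e then rs ++ [[("start", s), ("end", e)]] else rs)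
      | none => aLoop block_size max_len rest (idx + 1) none rs

def mask_bits_to_ranges_py (mask_bits : List Int) (block_size : Int) (max_len : Int) : List (List (String × Int)) :=
  let p := aLoop block_size max_len mask_bits 0 none []
  match p.2 with
  | some s =>
    let e := min ((mask_bits.length : Int) * block_size) max_len
    if s < e then p.1 ++ [[("start", s), ("end", e)]] else p.1
  | none => p.1

-- ===== PORT B =====
-- inner 'while j < n and mask_bits[j]': length of the leading run of truthy bits
def runLen : List Int → Nat
  | [] => 0
  | b :: rest => if b ≠ 0 then runLen rest + 1 else 0

-- the suffix after that leading run
def dropRun : List Int → List Int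
  | [] => []
  | b :: rest => if b ≠ 0 then dropRun rest else b :: rest

theorem dropRun_length_le : ∀ l : List Int, (dropRun l).length ≤ l.length
  | [] => Nat.le_refl _
  | b :: rest => by
    by_cases h : b ≠ 0
    · simp [dropRun, h]; exact Nat.le_succ_of_le (dropRun_length_le rest)
    · simp [dropRun, h]

-- outer 'while i < n' loop of B: skip falsy bits, emit one range per maximal run
def bLoop (block_size max_len : Int) : List Int → Int → List (List (String × Int))
  | [], _ => []
  | b :: rest, i =>
    if b ≠ 0 then
      let j := i + (runLen rest : Int) + 1
      let start := i * block_size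
      let e := min (j * block_size) max_len
      let tail := bLoop block_size max_len (dropRun rest) j
      if start < e then [("start", start), ("end", e)] :: tail else tail
    else
      bLoop block_size max_len rest (i + 1)
termination_by l _ => l.length
decreasing_by
  · exact Nat.lt_succ_of_le (dropRun_length_le rest)
  · exact Nat.lt_succ_self _

def mask_bits_to_ranges_py_alt (mask_bits : List Int) (block_size : Int) (max_len : Int) : List (List (String × Int)) :=
  bLoop block_size max_len mask_bits 0

-- ===== PRECONDITION & SPEC =====
def Spec_mask_bits_to_ranges_py (mask_bits : List Int) (block_size : Int) (max_len : Int) (out : List (List (String × Int))) : Prop := out = mask_bits_to_ranges_py_alt mask_bits block_size max_len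
instance (mask_bits : List Int) (block_size : Int) (max_len : Int) (out : List (List (String × Int))) : Decidable (Spec_mask_bits_to_ranges_py mask_bits block_size max_len out) := by unfold Spec_mask_bits_to_ranges_py; infer_instance

-- ===== CLAIM (what is proved, stated in full; the proofs are below) =====
def Claim_equal_mask_bits_to_ranges_py : Prop := ∀ (mask_bits : List Int) (block_size : Int) (max_len : Int), Dom_mask_bits_to_ranges_py mask_bits block_size max_len → Spec_mask_bits_to_ranges_py mask_bits block_size max_len (mask_bits_to_ranges_py mask_bits block_size max_len)

-- ===== LEMMAS AND PROOFS =====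

-- the final flush of A, applied at one-past-the-end index n
def aFin (block_size max_len n : Int) (p : List (List (String × Int)) × Option Int) : List (List (String × Int)) :=
  match p.2 with
  | some s =>
    let e := min (n * block_size) max_len
    if s < e then p.1 ++ [[("start", s), ("end", e)]] else p.1
  | none => p.1

-- loop invariant: A's loop-then-flush equals B's run scan, for both shapes of A's carried state
theorem aLoop_eq_bLoop (bs ml : Int) : ∀ l : List Int, (∀ i rs,
    aFin bs ml (i + l.length) (aLoop bs ml l i none rs) = rs ++ bLoop bs ml l i)
  ∧ (∀ i rs s,
    aFin bs ml (i + l.length) (aLoop bs ml l i (some s) rs) =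
      (if s < min ((i + (runLen l : Int)) * bs) ml then
        rs ++ [[("start", s), ("end", min ((i + (runLen l : Int)) * bs) ml)]] else rs)
      ++ bLoop bs ml (dropRun l) (i + (runLen l : Int)))
  | [] => by
    constructor
    · intro i rs; simp [aLoop, aFin, bLoop]
    · intro i rs s; simp [aLoop, aFin, bLoop, runLen, dropRun]
  | b :: rest => by
    have IH := aLoop_eq_bLoop bs ml rest
    have hlen : ∀ i : Int, i + (((b :: rest).length : Nat) : Int) = (i + 1) + (rest.length : Int) := by
      intro i; push_cast [List.length_cons]; ring
    constructor
    · intro i rs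
      by_cases hb : b = 0
      · subst hb
        simp only [aLoop, ne_eq, not_true_eq_false, if_false, reduceIte]
        rw [hlen, IH.1 (i + 1) rs]
        simp [bLoop]
      · simp only [aLoop, hb, ne_eq, not_false_eq_true, if_true]
        rw [hlen, IH.2 (i + 1) rs (i * bs)]
        simp only [bLoop, hb, ne_eq, not_false_eq_true, if_true]
        have hj : (i + 1) + (runLen rest : Int) = i + (runLen rest : Int) + 1 := by ring
        rw [hj]
        by_cases hc : i * bs < min ((i + (runLen rest : Int) + 1) * bs) ml <;>
          simp [hc, List.append_assoc]
    · intro i rs s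
      by_cases hb : b = 0
      · -- run ends here: A appends (maybe) and clears; B's runLen is 0
        subst hb
        simp only [aLoop, ne_eq, not_true_eq_false, if_false]
        rw [hlen, IH.1 (i + 1) _]
        simp [runLen, dropRun, bLoop]
      · -- run continues: state unchanged, runLen grows by one
        simp only [aLoop, hb, ne_eq, not_false_eq_true, if_true, reduceCtorEq, if_false]
        rw [hlen, IH.2 (i + 1) rs s]
        have hj : (i + 1) + (runLen rest : Int) = i + ((runLen (b :: rest) : Nat) : Int) := by
          simp [runLen, hb]; ring
        rw [hj]
        simp [dropRun, hb]

-- ===== VERDICT (by name: the statement is the Claim_ definition above) =====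
theorem mask_bits_to_ranges_py_spec : Claim_equal_mask_bits_to_ranges_py := by
  intro mask_bits bs ml _
  unfold Spec_mask_bits_to_ranges_py mask_bits_to_ranges_py mask_bits_to_ranges_py_alt
  have h := (aLoop_eq_bLoop bs ml mask_bits).1 0 []
  simpa [aFin] using h
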